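-- pv_equiv track=rewrite | github.com/j-carson/advent_2025 | 03/part2.py | max_jolts
-- ===== SOURCE A (Python) =====
-- def max_jolts(bank, target_length):
--     while len(bank) > target_length:
--         for i in range(1, len(bank)):
--             if bank[i] > bank[i - 1]:
--                 bank = bank[: i - 1] + bank[i:]
--                 break
--         else:
--             break
--
--     return bank[:target_length]
-- ===== SOURCE B (Python) =====
-- def max_jolts(bank, target_length):
--     # One-pass monotonic non-increasing stack with a deletion budget, then slice.
--     rem = len(bank) - target_length
--     stack = []
--     for x in bank:
--         while stack and rem > 0 and stack[-1] < x:
--             stack.pop()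
--             rem -= 1
--         stack.append(x)
--     return stack[:target_length]
-- ===== Notes on version B (the rewrite author's own statement) =====
-- stated objective: faster
-- what changed: Replaced the restart-from-scratch delete-first-ascent loop (rescan the list after every single deletion) by a single left-to-right pass maintaining a non-increasing stack with a deletion budget, then one final slice.
import Mathlib
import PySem

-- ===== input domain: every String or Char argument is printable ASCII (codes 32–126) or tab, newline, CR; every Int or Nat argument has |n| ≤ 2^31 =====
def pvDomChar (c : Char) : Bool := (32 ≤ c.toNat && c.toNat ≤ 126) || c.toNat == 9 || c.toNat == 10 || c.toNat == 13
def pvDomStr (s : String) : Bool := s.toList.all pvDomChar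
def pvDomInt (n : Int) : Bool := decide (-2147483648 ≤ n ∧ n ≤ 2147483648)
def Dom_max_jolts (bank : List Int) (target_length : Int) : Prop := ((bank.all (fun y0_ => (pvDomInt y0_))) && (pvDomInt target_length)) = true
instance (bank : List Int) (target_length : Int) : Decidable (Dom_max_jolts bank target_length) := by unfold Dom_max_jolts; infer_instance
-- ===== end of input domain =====

-- B replaces A's restart-after-each-deletion scan by one monotonic-stack pass with a
-- deletion budget (objective: faster).

-- ===== PORT A =====
-- inner 'for i in range(1, len(bank)): if bank[i] > bank[i-1]: bank = bank[:i-1] + bank[i:]; break'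
-- (returns the rebuilt bank on break, none when the for-loop falls through to its else)
def maxJoltsFind (bank : List Int) : List Int → Option (List Int)
  | [] => none
  | i :: rs =>
      if PySem.List.pyGetD bank (i - 1) 0 < PySem.List.pyGetD bank i 0 then
        some (PySem.List.slice bank none (some (i - 1)) ++ PySem.List.slice bank (some i) none)
      else maxJoltsFind bank rs

-- termination fact for the while-loop: a successful deletion shortens the list
theorem maxJoltsFind_length_lt (bank : List Int) :
    ∀ (rs : List Int), (∀ i ∈ rs, 1 ≤ i ∧ i < (bank.length : Int)) →
    ∀ b', maxJoltsFind bank rs = some b' → b'.length < bank.length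
  | [], _, b', h => by simp [maxJoltsFind] at h
  | i :: rs, hr, b', h => by
      have hi := hr i (by simp)
      rw [maxJoltsFind] at h
      split at h
      · have hb : b' = PySem.List.slice bank none (some (i - 1)) ++ PySem.List.slice bank (some i) none :=
          (Option.some.inj h).symm
        rw [hb, PySem.List.slice_to _ (by omega), PySem.List.slice_from _ (by omega)]
        simp only [List.length_append, List.length_take, List.length_drop]
        omega
      · exact maxJoltsFind_length_lt bank rs (fun j hj => hr j (by simp [hj])) b' h

-- 'while len(bank) > target_length: … break'
def maxJoltsLoop (bank : List Int) (target_length : Int) : List Int :=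
  if (bank.length : Int) > target_length then
    match h : maxJoltsFind bank (PySem.List.pyRange 1 (bank.length : Int) 1) with
    | some b2 => maxJoltsLoop b2 target_length
    | none => bank
  else bank
termination_by bank.length
decreasing_by
  exact maxJoltsFind_length_lt bank _
    (fun i hi => by have := (PySem.List.mem_pyRange_one).1 hi; omega) _ h

def max_jolts (bank : List Int) (target_length : Int) : List Int :=
  PySem.List.slice (maxJoltsLoop bank target_length) none (some target_length)

-- ===== PORT B =====
-- 'while stack and rem > 0 and stack[-1] < x: stack.pop(); rem -= 1'
def altPop (x : Int) : List Int → Int → List Int × Int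
  | stack, rem =>
      match h : stack.getLast? with
      | some top =>
          if rem > 0 ∧ top < x then altPop x stack.dropLast (rem - 1) else (stack, rem)
      | none => (stack, rem)
termination_by stack _ => stack.length
decreasing_by
  have hne : stack ≠ [] := by intro hs; rw [hs] at h; simp at h
  have := List.length_pos_of_ne_nil hne
  simp only [List.length_dropLast]
  omega

def altStep (p : List Int × Int) (x : Int) : List Int × Int :=
  ((altPop x p.1 p.2).1 ++ [x], (altPop x p.1 p.2).2)

def max_jolts_alt (bank : List Int) (target_length : Int) : List Int :=
  let rem : Int := (bank.length : Int) - target_length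
  let p := bank.foldl altStep ([], rem)
  PySem.List.slice p.1 none (some target_length)

-- ===== PRECONDITION & SPEC =====
def Spec_max_jolts (bank : List Int) (target_length : Int) (out : List Int) : Prop := out = max_jolts_alt bank target_length
instance (bank : List Int) (target_length : Int) (out : List Int) : Decidable (Spec_max_jolts bank target_length out) := by unfold Spec_max_jolts; infer_instance

-- ===== CLAIM (what is proved, stated in full; the proofs are below) =====
def Claim_equal_max_jolts : Prop := ∀ (bank : List Int) (target_length : Int), Dom_max_jolts bank target_length → Spec_max_jolts bank target_length (max_jolts bank target_length)

-- ===== LEMMAS AND PROOFS =====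

-- altPop does nothing when the budget is gone
theorem altPop_of_nonpos (x : Int) (s : List Int) (r : Int) (hr : r ≤ 0) :
    altPop x s r = (s, r) := by
  rw [altPop.eq_1]
  split
  · rw [if_neg (by omega)]
  · rfl

-- altPop does nothing when the top of the stack is ≥ x
theorem altPop_of_le (x : Int) (s : List Int) (r : Int)
    (hs : ∀ a, s.getLast? = some a → x ≤ a) :
    altPop x s r = (s, r) := by
  rw [altPop.eq_1]
  split
  · next top heq =>
      have := hs top heq
      rw [if_neg (by omega)]
  · rfl

-- one pop: a < x on top of the stack with budget left
theorem altPop_pop (x a : Int) (s : List Int) (r : Int) (hr : 0 < r) (hax : a < x) :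
    altPop x (s ++ [a]) r = altPop x s (r - 1) := by
  rw [altPop.eq_1]
  split
  · next top heq =>
      rw [List.getLast?_concat] at heq
      have hta : top = a := Option.some.inj heq.symm
      rw [if_pos ⟨hr, by omega⟩, List.dropLast_concat]
  · next heq => rw [List.getLast?_concat] at heq; exact absurd heq (by simp)

-- folding a block that never pops (the accumulated stack stays non-increasing)
theorem foldl_nopop (ys : List Int) : ∀ (s : List Int) (r : Int),
    List.IsChain (fun a b : Int => b ≤ a) (s ++ ys) →
    ys.foldl altStep (s, r) = (s ++ ys, r)
  | s, r, h => by
      cases ys with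
      | nil => simp
      | cons y ys =>
          have hpop : altPop y s r = (s, r) := by
            apply altPop_of_le
            intro a ha
            rcases (List.isChain_append.1 h) with ⟨_, _, hj⟩
            exact hj a ha y (by simp)
          have h2 : List.IsChain (fun a b : Int => b ≤ a) ((s ++ [y]) ++ ys) := by
            simpa using h
          calc (y :: ys).foldl altStep (s, r)
              = ys.foldl altStep (altStep (s, r) y) := rfl
            _ = ys.foldl altStep (s ++ [y], r) := by simp [altStep, hpop]
            _ = ((s ++ [y]) ++ ys, r) := foldl_nopop ys (s ++ [y]) r h2
            _ = (s ++ y :: ys, r) := by simp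

-- folding with an exhausted budget appends everything
theorem foldl_nobudget (ys : List Int) : ∀ (s : List Int) (r : Int), r ≤ 0 →
    ys.foldl altStep (s, r) = (s ++ ys, r)
  | s, r, hr => by
      cases ys with
      | nil => simp
      | cons y ys =>
          calc (y :: ys).foldl altStep (s, r)
              = ys.foldl altStep (altStep (s, r) y) := rfl
            _ = ys.foldl altStep (s ++ [y], r) := by simp [altStep, altPop_of_nonpos y s r hr]
            _ = ((s ++ [y]) ++ ys, r) := foldl_nobudget ys (s ++ [y]) r hr
            _ = (s ++ y :: ys, r) := by simp

-- deleting the left element of the first ascent commutes with the stack pass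
theorem foldl_delete (p : List Int) (a b : Int) (rest : List Int) (r : Int)
    (hch : List.IsChain (fun x y : Int => y ≤ x) (p ++ [a])) (hab : a < b) (hr : 0 < r) :
    (p ++ a :: b :: rest).foldl altStep ([], r)
      = (p ++ b :: rest).foldl altStep ([], r - 1) := by
  have h1 : (p ++ a :: b :: rest) = (p ++ [a]) ++ (b :: rest) := by simp
  have hl : (p ++ [a]).foldl altStep (([] : List Int), r) = (p ++ [a], r) := by
    have := foldl_nopop (p ++ [a]) [] r (by simpa using hch)
    simpa using this
  have hchp : List.IsChain (fun x y : Int => y ≤ x) p := (List.isChain_append.1 hch).1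
  have hp : p.foldl altStep (([] : List Int), r - 1) = (p, r - 1) := by
    have := foldl_nopop p [] (r - 1) (by simpa using hchp)
    simpa using this
  rw [h1, List.foldl_append, hl]
  conv_rhs => rw [show (p ++ b :: rest) = (p ++ [b]) ++ rest by simp]
  rw [List.foldl_append, List.foldl_append, hp]
  have hstep : altStep (p ++ [a], r) b = altStep (p, r - 1) b := by
    simp [altStep, altPop_pop b a p r hr hab]
  simp only [List.foldl_cons, List.foldl_nil]
  rw [hstep]

-- characterisation of A's inner scan, starting at index j with the first j elements non-increasing
theorem find_spec (bank : List Int) : ∀ (j : Nat), 1 ≤ j →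
    List.IsChain (fun a b : Int => b ≤ a) (bank.take j) →
    (maxJoltsFind bank (PySem.List.pyRange (j : Int) (bank.length : Int) 1) = none →
        List.IsChain (fun a b : Int => b ≤ a) bank)
    ∧ (∀ b', maxJoltsFind bank (PySem.List.pyRange (j : Int) (bank.length : Int) 1) = some b' →
        ∃ p a b rest, bank = p ++ a :: b :: rest
          ∧ List.IsChain (fun x y : Int => y ≤ x) (p ++ [a]) ∧ a < b ∧ b' = p ++ b :: rest) := by
  intro j
  induction hfuel : bank.length - j generalizing j with
  | zero =>
      intro hj hch
      have hjl : bank.length ≤ j := by omega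
      rw [PySem.List.pyRange_one_eq_nil (by exact_mod_cast hjl)]
      constructor
      · intro _
        have : bank.take j = bank := List.take_of_length_le hjl
        rwa [this] at hch
      · intro b' h; simp [maxJoltsFind] at h
  | succ n ih =>
      intro hj hch
      have hjl : j < bank.length := by omega
      have hj1l : j - 1 < bank.length := by omega
      rw [PySem.List.pyRange_one_cons (by exact_mod_cast hjl)]
      rw [maxJoltsFind]
      have hj1 : ((j : Int) - 1) = ((j - 1 : Nat) : Int) := by omega
      have hg1 : PySem.List.pyGetD bank ((j : Int) - 1) 0 = bank[j - 1]'hj1l := by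
        rw [hj1, PySem.List.pyGetD_natCast]
        exact List.getD_eq_getElem bank 0 hj1l
      have hg2 : PySem.List.pyGetD bank (j : Int) 0 = bank[j]'hjl := by
        rw [PySem.List.pyGetD_natCast]
        exact List.getD_eq_getElem bank 0 hjl
      have hsub : j - 1 + 1 = j := by omega
      have ht : bank.take j = bank.take (j - 1) ++ [bank[j - 1]'hj1l] := by
        conv_lhs => rw [← hsub]
        rw [List.take_succ, List.getElem?_eq_getElem hj1l]
        simp
      by_cases hasc : bank[j - 1]'hj1l < bank[j]'hjl
      · rw [if_pos (by rw [hg1, hg2]; exact hasc)]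
        constructor
        · intro h; simp at h
        · intro b' h
          refine ⟨bank.take (j - 1), bank[j - 1]'hj1l, bank[j]'hjl, bank.drop (j + 1), ?_, ?_, hasc, ?_⟩
          · have hdj : bank.drop (j - 1) = bank[j - 1]'hj1l :: bank[j]'hjl :: bank.drop (j + 1) := by
              rw [← List.getElem_cons_drop hj1l, hsub, ← List.getElem_cons_drop hjl]
            rw [← hdj]
            exact (List.take_append_drop (j - 1) bank).symm
          · rw [← ht]; exact hch
          · have hb : b' = PySem.List.slice bank none (some ((j : Int) - 1)) ++ PySem.List.slice bank (some (j : Int)) none :=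
              (Option.some.inj h).symm
            rw [hb, PySem.List.slice_to _ (by omega), PySem.List.slice_from _ (by omega)]
            congr 1
            · congr 1; omega
            · rw [Int.toNat_natCast]
              rw [← List.getElem_cons_drop hjl]
      · rw [if_neg (by rw [hg1, hg2]; exact hasc)]
        have hch' : List.IsChain (fun a b : Int => b ≤ a) (bank.take (j + 1)) := by
          rw [List.take_succ, List.getElem?_eq_getElem hjl]
          simp only [Option.toList_some]
          rw [List.isChain_append]
          refine ⟨hch, by simp, ?_⟩
          intro x hx y hy
          simp at hy
          subst hy
          rw [ht, List.getLast?_append] at hx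
          simp at hx
          subst hx
          omega
        have := ih (j + 1) (by omega) (by omega) hch'
        have hc : ((j : Int) + 1) = ((j + 1 : Nat) : Int) := by push_cast; ring
        rw [hc]
        exact this

-- the while-loop of A computes exactly B's stack
theorem loop_eq_fold (bank : List Int) (t : Int) :
    maxJoltsLoop bank t = (bank.foldl altStep ([], (bank.length : Int) - t)).1 := by
  induction hfuel : bank.length using Nat.strong_induction_on generalizing bank with
  | _ n ih =>
  subst hfuel
  rw [maxJoltsLoop]
  by_cases hlen : (bank.length : Int) > t
  · rw [if_pos hlen]
    have hr : 0 < (bank.length : Int) - t := by omega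
    have hspec := find_spec bank 1 (by omega)
      (by cases bank with
          | nil => simp
          | cons x xs => simp)
    simp only [Nat.cast_one] at hspec
    split
    next b2 hfind =>
        obtain ⟨p, a, b, rest, hbank, hch, hab, hb2⟩ := hspec.2 b2 hfind
        have hlen2 : b2.length < bank.length := by
          rw [hbank, hb2]; simp
        have ihb := ih b2.length hlen2 b2 rfl
        rw [ihb]
        have hlb2 : (b2.length : Int) - t = ((bank.length : Int) - t) - 1 := by
          have : b2.length + 1 = bank.length := by
            rw [hbank, hb2]; simp; omega
          omega
        rw [hlb2]
        have hdel := foldl_delete p a b rest ((bank.length : Int) - t) hch hab hr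
        rw [← hbank, ← hb2] at hdel
        rw [hdel]
    next hfind =>
        have hchain := hspec.1 hfind
        have := foldl_nopop bank [] ((bank.length : Int) - t) (by simpa using hchain)
        simp only [List.nil_append] at this
        rw [this]
  · rw [if_neg hlen]
    have := foldl_nobudget bank [] ((bank.length : Int) - t) (by omega)
    simp only [List.nil_append] at this
    rw [this]

-- ===== VERDICT (by name: the statement is the Claim_ definition above) =====
theorem max_jolts_spec : Claim_equal_max_jolts := by
  intro bank t _
  unfold Spec_max_jolts max_jolts max_jolts_alt
  rw [loop_eq_fold]
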